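-- pv_equiv track=rewrite | github.com/keizman/only-test | airtest/lib/mcp_interface/device_inspector.py | _analyze_features
-- ===== SOURCE A (Python) =====
-- from typing import Dict, List, Any, Optional
--
-- def _analyze_features(elements: List[Dict[str, Any]]) -> Dict[str, Any]:
--     """分析可用功能"""
--     features = {
--         "search_available": False,
--         "login_available": False,
--         "media_controls": False,
--         "navigation_available": False
--     }
--
--     for element in elements:
--         text = element.get("text", "").lower()
--         resource_id = element.get("resource_id", "").lower()
--
--         if "search" in text or "search" in resource_id:
--             features["search_available"] = True
--         if "login" in text or "sign" in text:
--             features["login_available"] = True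
--         if "play" in text or "pause" in text:
--             features["media_controls"] = True
--         if "back" in text or "menu" in text or "home" in text:
--             features["navigation_available"] = True
--
--     return features
-- ===== SOURCE B (Python) =====
-- from typing import Dict, List, Any
--
--
-- def _analyze_features(elements: List[Dict[str, Any]]) -> Dict[str, Any]:
--     """Analyze available features: four independent any() scans, one per feature."""
--     return {
--         "search_available": any(
--             "search" in e.get("text", "").lower()
--             or "search" in e.get("resource_id", "").lower()
--             for e in elements
--         ),
--         "login_available": any(
--             "login" in e.get("text", "").lower()
--             or "sign" in e.get("text", "").lower()
--             for e in elements
--         ),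
--         "media_controls": any(
--             "play" in e.get("text", "").lower()
--             or "pause" in e.get("text", "").lower()
--             for e in elements
--         ),
--         "navigation_available": any(
--             "back" in e.get("text", "").lower()
--             or "menu" in e.get("text", "").lower()
--             or "home" in e.get("text", "").lower()
--             for e in elements
--         ),
--     }
-- ===== Notes on version B (the rewrite author's own statement) =====
-- stated objective: idiomatic
-- what changed: Replaced the single loop that mutates four shared dict flags with a directly-built result dict of four independent any(...) scans, one per feature.
import Mathlib
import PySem

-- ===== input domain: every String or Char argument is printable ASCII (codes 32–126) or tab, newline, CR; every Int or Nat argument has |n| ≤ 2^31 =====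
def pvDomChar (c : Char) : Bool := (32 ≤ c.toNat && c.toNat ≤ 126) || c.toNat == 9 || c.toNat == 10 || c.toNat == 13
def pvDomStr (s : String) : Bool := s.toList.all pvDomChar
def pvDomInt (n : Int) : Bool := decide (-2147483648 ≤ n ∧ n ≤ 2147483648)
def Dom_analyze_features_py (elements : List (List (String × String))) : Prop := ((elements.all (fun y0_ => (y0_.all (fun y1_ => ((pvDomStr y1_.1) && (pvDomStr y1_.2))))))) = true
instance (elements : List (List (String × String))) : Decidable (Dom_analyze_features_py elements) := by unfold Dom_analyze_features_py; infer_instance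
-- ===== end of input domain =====

-- B rebuilds the result dict directly from four independent any(...) scans instead of A's
-- single loop mutating four shared flags; same cost, more idiomatic.

-- ===== PORT A =====
-- loop body of A, extracted as a helper (one iteration of the for-loop)
def pvStepA (features : PySem.Dict String Bool) (element : List (String × String)) :
    PySem.Dict String Bool :=
  let text := PySem.Str.lower ((PySem.Dict.mk element).getD "text" "")
  let resource_id := PySem.Str.lower ((PySem.Dict.mk element).getD "resource_id" "")
  let features := if PySem.Str.isIn "search" text || PySem.Str.isIn "search" resource_id then
      features.insert "search_available" true else features
  let features := if PySem.Str.isIn "login" text || PySem.Str.isIn "sign" text then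
      features.insert "login_available" true else features
  let features := if PySem.Str.isIn "play" text || PySem.Str.isIn "pause" text then
      features.insert "media_controls" true else features
  let features := if PySem.Str.isIn "back" text || PySem.Str.isIn "menu" text || PySem.Str.isIn "home" text then
      features.insert "navigation_available" true else features
  features

def analyze_features_py (elements : List (List (String × String))) : List (String × Bool) :=
  let features : PySem.Dict String Bool :=
    ((((PySem.Dict.empty.insert "search_available" false).insert
        "login_available" false).insert
        "media_controls" false).insert
        "navigation_available" false)
  (elements.foldl pvStepA features).items

-- ===== PORT B =====
def analyze_features_py_alt (elements : List (List (String × String))) : List (String × Bool) :=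
  [("search_available", elements.any (fun e =>
      PySem.Str.isIn "search" (PySem.Str.lower ((PySem.Dict.mk e).getD "text" "")) ||
      PySem.Str.isIn "search" (PySem.Str.lower ((PySem.Dict.mk e).getD "resource_id" "")))),
   ("login_available", elements.any (fun e =>
      PySem.Str.isIn "login" (PySem.Str.lower ((PySem.Dict.mk e).getD "text" "")) ||
      PySem.Str.isIn "sign" (PySem.Str.lower ((PySem.Dict.mk e).getD "text" "")))),
   ("media_controls", elements.any (fun e =>
      PySem.Str.isIn "play" (PySem.Str.lower ((PySem.Dict.mk e).getD "text" "")) ||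
      PySem.Str.isIn "pause" (PySem.Str.lower ((PySem.Dict.mk e).getD "text" "")))),
   ("navigation_available", elements.any (fun e =>
      PySem.Str.isIn "back" (PySem.Str.lower ((PySem.Dict.mk e).getD "text" "")) ||
      PySem.Str.isIn "menu" (PySem.Str.lower ((PySem.Dict.mk e).getD "text" "")) ||
      PySem.Str.isIn "home" (PySem.Str.lower ((PySem.Dict.mk e).getD "text" ""))))]

-- ===== PRECONDITION & SPEC =====
def Spec_analyze_features_py (elements : List (List (String × String))) (out : List (String × Bool)) : Prop := out = analyze_features_py_alt elements
instance (elements : List (List (String × String))) (out : List (String × Bool)) : Decidable (Spec_analyze_features_py elements out) := by unfold Spec_analyze_features_py; infer_instance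

-- ===== CLAIM (what is proved, stated in full; the proofs are below) =====
def Claim_equal_analyze_features_py : Prop := ∀ (elements : List (List (String × String))), Dom_analyze_features_py elements → Spec_analyze_features_py elements (analyze_features_py elements)

-- ===== LEMMAS AND PROOFS =====

-- the four-flag dictionary A's loop maintains, parameterised by its current values
def pvD (s l m n : Bool) : PySem.Dict String Bool :=
  ((((PySem.Dict.empty.insert "search_available" s).insert
      "login_available" l).insert
      "media_controls" m).insert
      "navigation_available" n)

-- B's four per-element predicates
def pvP1 (e : List (String × String)) : Bool :=
  PySem.Str.isIn "search" (PySem.Str.lower ((PySem.Dict.mk e).getD "text" "")) ||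
  PySem.Str.isIn "search" (PySem.Str.lower ((PySem.Dict.mk e).getD "resource_id" ""))
def pvP2 (e : List (String × String)) : Bool :=
  PySem.Str.isIn "login" (PySem.Str.lower ((PySem.Dict.mk e).getD "text" "")) ||
  PySem.Str.isIn "sign" (PySem.Str.lower ((PySem.Dict.mk e).getD "text" ""))
def pvP3 (e : List (String × String)) : Bool :=
  PySem.Str.isIn "play" (PySem.Str.lower ((PySem.Dict.mk e).getD "text" "")) ||
  PySem.Str.isIn "pause" (PySem.Str.lower ((PySem.Dict.mk e).getD "text" ""))
def pvP4 (e : List (String × String)) : Bool :=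
  PySem.Str.isIn "back" (PySem.Str.lower ((PySem.Dict.mk e).getD "text" "")) ||
  PySem.Str.isIn "menu" (PySem.Str.lower ((PySem.Dict.mk e).getD "text" "")) ||
  PySem.Str.isIn "home" (PySem.Str.lower ((PySem.Dict.mk e).getD "text" ""))

-- conditional inserts on pvD, by cases on all Bool arguments
theorem pvStep_eq (s l m n c1 c2 c3 c4 : Bool) :
    (let f := pvD s l m n
     let f := if c1 then f.insert "search_available" true else f
     let f := if c2 then f.insert "login_available" true else f
     let f := if c3 then f.insert "media_controls" true else f
     let f := if c4 then f.insert "navigation_available" true else f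
     f) = pvD (s || c1) (l || c2) (m || c3) (n || c4) := by
  cases s <;> cases l <;> cases m <;> cases n <;>
    cases c1 <;> cases c2 <;> cases c3 <;> cases c4 <;> rfl

theorem pvStepA_eq (s l m n : Bool) (e : List (String × String)) :
    pvStepA (pvD s l m n) e = pvD (s || pvP1 e) (l || pvP2 e) (m || pvP3 e) (n || pvP4 e) := by
  have h := pvStep_eq s l m n (pvP1 e) (pvP2 e) (pvP3 e) (pvP4 e)
  simpa [pvStepA, pvP1, pvP2, pvP3, pvP4] using h

theorem pvFold_eq (els : List (List (String × String))) :
    ∀ s l m n : Bool,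
    (els.foldl pvStepA (pvD s l m n)).items =
      [("search_available", s || els.any pvP1),
       ("login_available", l || els.any pvP2),
       ("media_controls", m || els.any pvP3),
       ("navigation_available", n || els.any pvP4)] := by
  induction els with
  | nil =>
      intro s l m n
      cases s <;> cases l <;> cases m <;> cases n <;> rfl
  | cons e t ih =>
      intro s l m n
      rw [List.foldl_cons, pvStepA_eq, ih]
      simp [Bool.or_assoc]

-- ===== VERDICT (by name: the statement is the Claim_ definition above) =====
theorem analyze_features_py_spec : Claim_equal_analyze_features_py := by
  intro elements _
  show analyze_features_py elements = analyze_features_py_alt elements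
  rw [show analyze_features_py elements
        = (elements.foldl pvStepA (pvD false false false false)).items from rfl,
      pvFold_eq]
  unfold pvP1 pvP2 pvP3 pvP4
  simp [analyze_features_py_alt]
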